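-- pv_equiv track=rewrite | github.com/kyuung09/AlgorithmTest | 프로그래머스/unrated/135808. 과일 장수/과일 장수.py | solution
-- ===== SOURCE A (Python) =====
-- def solution(k, m, score):
--     answer = 0
--     score.sort(reverse=True)
--     i = 0
--
--
--     for i in range(0, len(score), m):       # i는 0부터 score의 range까지 m씩 증가
--         tmp = score[i:i+m]                  # temp에 score배열을 슬라이싱 하여 넣는다
--
--         if len(tmp) == m:                   # if tmp의 길이와 M의 길이가 같다면
--             answer += min(tmp) * m          # 최소값에다가 가격을 곱해서 총 가격을 구한다
--
--     return answer
-- ===== SOURCE B (Python) =====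
-- def solution(k, m, score):
--     score.sort(reverse=True)
--     return m * sum(score[m - 1::m])
-- ===== Notes on version B (the rewrite author's own statement) =====
-- stated objective: simpler
-- what changed: Replaces the chunk-slicing loop with its per-chunk min() and length test by a single strided slice: in the descending-sorted array every full group's minimum sits at index m-1, 2m-1, ..., so the answer is m * sum(score[m-1::m]).
-- outside the precondition, e.g. on solution(0, -2, [1, 2, 3]): A returns 0, B returns -6
import Mathlib
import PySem

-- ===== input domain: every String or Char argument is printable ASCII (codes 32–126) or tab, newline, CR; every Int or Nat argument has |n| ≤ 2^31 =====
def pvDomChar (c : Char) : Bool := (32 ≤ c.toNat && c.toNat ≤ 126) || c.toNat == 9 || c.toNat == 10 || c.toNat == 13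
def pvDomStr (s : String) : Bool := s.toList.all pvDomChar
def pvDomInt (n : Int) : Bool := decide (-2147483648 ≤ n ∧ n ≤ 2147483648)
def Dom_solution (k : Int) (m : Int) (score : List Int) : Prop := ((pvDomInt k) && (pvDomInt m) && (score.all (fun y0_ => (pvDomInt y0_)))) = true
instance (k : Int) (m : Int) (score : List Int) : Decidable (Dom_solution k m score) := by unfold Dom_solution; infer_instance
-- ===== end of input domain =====

-- B replaces A's chunk-slicing loop (per-chunk min() and length test) by one strided slice
-- of the descending-sorted list: answer = m * sum(score[m-1::m]). Pre_ restricts to the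
-- natural domain m >= 1 (m == 0 raises in both; m < 0 is outside the problem's domain).
-- Both A and B sort `score` in place; the equivalence proved here is about the return value.


-- ===== PORT A =====
def solution (k : Int) (m : Int) (score : List Int) : Int :=
  -- answer = 0; score.sort(reverse=True); for i in range(0, len(score), m): ...
  let s := PySem.List.sorted score (fun x => x) true
  (PySem.List.pyRange 0 (s.length : Int) m).foldl
    (fun answer i =>
      let tmp := PySem.List.slice s (some i) (some (i + m))  -- tmp = score[i:i+m]
      if (tmp.length : Int) = m then
        answer + ((PySem.List.min? tmp (fun x => x)).getD 0) * m  -- min(tmp) * m; tmp ≠ [] under the guard for m ≥ 1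
      else answer) 0

-- ===== PORT B =====
def solution_alt (k : Int) (m : Int) (score : List Int) : Int :=
  -- score.sort(reverse=True); return m * sum(score[m-1::m])
  let s := PySem.List.sorted score (fun x => x) true
  m * ((PySem.List.slice? s (some (m - 1)) none m).getD []).sum

-- ===== PRECONDITION & SPEC =====
-- Pre_ restricts to the problem's natural domain m ≥ 1: at m = 0 both programs raise
-- ValueError, and for m < 0 A returns 0 only because range(0, n, m) is empty — outside
-- the task's domain (see claim.json cites for an excluded input A still returns on).
def Pre_solution (k : Int) (m : Int) (score : List Int) : Prop := 1 ≤ m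
instance (k : Int) (m : Int) (score : List Int) : Decidable (Pre_solution k m score) := by unfold Pre_solution; infer_instance
def pvWitness_solution : Int × Int × List Int := (2, 2, [1, 2, 3])
def Spec_solution (k : Int) (m : Int) (score : List Int) (out : Int) : Prop := out = solution_alt k m score
instance (k : Int) (m : Int) (score : List Int) (out : Int) : Decidable (Spec_solution k m score out) := by unfold Spec_solution; infer_instance

-- ===== CLAIM (what is proved, stated in full; the proofs are below) =====
def Claim_equal_solution : Prop := ∀ (k : Int) (m : Int) (score : List Int), Dom_solution k m score → Pre_solution k m score → Spec_solution k m score (solution k m score)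


-- ===== LEMMAS AND PROOFS =====

-- last element of a ≥-descending list is a lower bound
theorem pvGetLast_le_of_desc (l : List Int) (h : l ≠ []) (hp : l.Pairwise (fun a b => b ≤ a)) :
    ∀ y ∈ l, l.getLast h ≤ y := by
  intro y hy
  obtain ⟨i, hi, rfl⟩ := List.mem_iff_getElem.mp hy
  rw [List.getLast_eq_getElem]
  rcases Nat.lt_or_ge i (l.length - 1) with hlt | hge
  · exact (List.pairwise_iff_getElem.mp hp) i (l.length - 1) hi (by omega) hlt
  · have : i = l.length - 1 := by omega
    subst this; exact le_refl _

-- Python min of a nonempty ≥-descending list is its last element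
theorem pvMin_desc (l : List Int) (h : l ≠ []) (hp : l.Pairwise (fun a b => b ≤ a)) :
    PySem.List.min? l (fun x => x) = some (l.getLast h) := by
  cases hv : PySem.List.min? l (fun x => x) with
  | none => exact absurd ((PySem.List.min?_eq_none_iff l _).mp hv) h
  | some v =>
    congr 1
    exact le_antisymm (PySem.List.min?_isMin hv _ (List.getLast_mem h))
      (pvGetLast_le_of_desc l h hp v (PySem.List.min?_mem hv))

-- value of A's loop body on a full chunk (k < len/M)
theorem pvChunk_term (s : List Int) (M : Nat) (hM : 1 ≤ M) (hp : s.Pairwise (fun a b => b ≤ a))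
    (k : Nat) (hk : k < s.length / M) :
    (if ((PySem.List.slice s (some ((0:Int) + (M:Int) * (k:Int))) (some ((0:Int) + (M:Int) * (k:Int) + (M:Int)))).length : Int) = (M:Int) then
      ((PySem.List.min? (PySem.List.slice s (some ((0:Int) + (M:Int) * (k:Int))) (some ((0:Int) + (M:Int) * (k:Int) + (M:Int)))) (fun x => x)).getD 0) * (M:Int)
    else 0) = s.getD (M - 1 + M * k) 0 * (M:Int) := by
  have hbnd : M * k + M ≤ s.length := by
    have h2 : (k + 1) * M ≤ s.length := (Nat.le_div_iff_mul_le (by omega)).mp hk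
    calc M * k + M = (k + 1) * M := by ring
      _ ≤ s.length := h2
  have e1 : (0:Int) + (M:Int) * (k:Int) = ((M * k : Nat) : Int) := by push_cast; ring
  rw [e1, show ((M * k : Nat) : Int) + (M:Int) = ((M * k : Nat) : Int) + ((M : Nat) : Int) from rfl,
    PySem.List.slice_natCast_add]
  set chunk := (s.drop (M * k)).take M with hchunk
  have hlen : chunk.length = M := by
    simp [hchunk]; omega
  rw [if_pos (by exact_mod_cast hlen)]
  have hne : chunk ≠ [] := by
    intro h; rw [h] at hlen; simp at hlen; omega
  have hpc : chunk.Pairwise (fun a b => b ≤ a) :=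
    List.Pairwise.sublist ((List.take_sublist _ _).trans (List.drop_sublist _ _)) hp
  rw [pvMin_desc chunk hne hpc, Option.getD_some]
  congr 1
  rw [List.getLast_eq_getElem]
  have hi : M - 1 < chunk.length := by omega
  have : chunk[chunk.length - 1]'(by omega) = chunk[M - 1]'hi := by
    congr 1; omega
  rw [this, List.getElem_take, List.getElem_drop, List.getD_eq_getElem s 0 (by omega)]
  congr 1
  omega

-- A's loop body vanishes on a short trailing chunk (len/M ≤ k)
theorem pvChunk_term_zero (s : List Int) (M : Nat) (hM : 1 ≤ M)
    (k : Nat) (hk : s.length / M ≤ k) :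
    (if ((PySem.List.slice s (some ((0:Int) + (M:Int) * (k:Int))) (some ((0:Int) + (M:Int) * (k:Int) + (M:Int)))).length : Int) = (M:Int) then
      ((PySem.List.min? (PySem.List.slice s (some ((0:Int) + (M:Int) * (k:Int))) (some ((0:Int) + (M:Int) * (k:Int) + (M:Int)))) (fun x => x)).getD 0) * (M:Int)
    else 0) = 0 := by
  have hdm := Nat.div_add_mod s.length M
  have hml : M * (s.length / M) ≤ M * k := Nat.mul_le_mul_left M hk
  have hmod : s.length % M < M := Nat.mod_lt _ (by omega)
  have e1 : (0:Int) + (M:Int) * (k:Int) = ((M * k : Nat) : Int) := by push_cast; ring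
  rw [e1, show ((M * k : Nat) : Int) + (M:Int) = ((M * k : Nat) : Int) + ((M : Nat) : Int) from rfl,
    PySem.List.slice_natCast_add]
  rw [if_neg]
  intro hc
  have hc' : ((s.drop (M * k)).take M).length = M := by exact_mod_cast hc
  simp at hc'
  omega

-- A's loop equals M * (sum of the strided minima) on a ≥-descending list
theorem pvAside (s : List Int) (M : Nat) (hM : 1 ≤ M) (hp : s.Pairwise (fun a b => b ≤ a)) :
    (PySem.List.pyRange 0 (s.length : Int) (M:Int)).foldl
      (fun answer i =>
        let tmp := PySem.List.slice s (some i) (some (i + (M:Int)))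
        if (tmp.length : Int) = (M:Int) then
          answer + ((PySem.List.min? tmp (fun x => x)).getD 0) * (M:Int)
        else answer) 0
    = (M:Int) * ((List.range (s.length / M)).map (fun k => s.getD (M - 1 + M * k) 0)).sum := by
  have hMpos : (0:Int) < (M:Int) := by exact_mod_cast hM
  have hbody : (fun (answer : Int) (i : Int) =>
        let tmp := PySem.List.slice s (some i) (some (i + (M:Int)))
        if (tmp.length : Int) = (M:Int) then
          answer + ((PySem.List.min? tmp (fun x => x)).getD 0) * (M:Int)
        else answer)
      = fun answer i => answer +
          (if ((PySem.List.slice s (some i) (some (i + (M:Int)))).length : Int) = (M:Int) then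
            ((PySem.List.min? (PySem.List.slice s (some i) (some (i + (M:Int)))) (fun x => x)).getD 0) * (M:Int)
          else 0) := by
    funext answer i
    by_cases hc : ((PySem.List.slice s (some i) (some (i + (M:Int)))).length : Int) = (M:Int) <;>
      simp [hc]
  rw [hbody, PySem.List.foldl_add, zero_add,
    PySem.List.pyRange_of_pos 0 (s.length : Int) hMpos, List.map_map]
  set n := s.length with hn
  set q := n / M with hq
  have hcnt : (if (0:Int) < (n:Int) then (((n:Int) - 0 + (M:Int) - 1) / (M:Int)).toNat else 0)
      = (n + M - 1) / M := by
    by_cases h0 : (0:Int) < (n:Int)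
    · rw [if_pos h0]
      have : ((n:Int) - 0 + (M:Int) - 1) = ((n + M - 1 : Nat) : Int) := by omega
      rw [this, ← Int.natCast_div, Int.toNat_natCast]
    · rw [if_neg h0]
      have : n = 0 := by omega
      simp [this]
      exact (Nat.div_eq_of_lt (by omega)).symm
  rw [hcnt]
  have hqle : q ≤ (n + M - 1) / M := Nat.div_le_div_right (by omega)
  obtain ⟨r, hr⟩ := Nat.exists_eq_add_of_le hqle
  rw [hr, List.range_add, List.map_append, List.sum_append, List.map_map]
  have hmap1 : (List.range q).map
        ((fun i => (if ((PySem.List.slice s (some i) (some (i + (M:Int)))).length : Int) = (M:Int) then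
            ((PySem.List.min? (PySem.List.slice s (some i) (some (i + (M:Int)))) (fun x => x)).getD 0) * (M:Int)
          else 0)) ∘ fun k : Nat => (0:Int) + (M:Int) * (k:Int))
      = (List.range q).map (fun k => s.getD (M - 1 + M * k) 0 * (M:Int)) := by
    refine List.map_congr_left ?_
    intro k hk
    exact pvChunk_term s M hM hp k (List.mem_range.mp hk)
  have hmap2 : ((List.range r).map
        (((fun i => (if ((PySem.List.slice s (some i) (some (i + (M:Int)))).length : Int) = (M:Int) then
            ((PySem.List.min? (PySem.List.slice s (some i) (some (i + (M:Int)))) (fun x => x)).getD 0) * (M:Int)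
          else 0)) ∘ fun k : Nat => (0:Int) + (M:Int) * (k:Int)) ∘ fun x => q + x)).sum = 0 := by
    apply List.sum_eq_zero
    intro x hx
    obtain ⟨j, hj, rfl⟩ := List.mem_map.mp hx
    exact pvChunk_term_zero s M hM (q + j) (by rw [← hq]; exact Nat.le_add_right q j)
  rw [hmap1, hmap2, add_zero, List.sum_map_mul_right, mul_comm]

-- ===== VERDICT (by name: the statement is the Claim_ definition above) =====
-- B's strided slice, written as a map over range (len / M)
theorem pvBside (s : List Int) (M : Nat) (hM : 1 ≤ M) :
    (PySem.List.slice? s (some ((M:Int) - 1)) none (M:Int)).getD [] =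
      (List.range (s.length / M)).map (fun k => s.getD (M - 1 + M * k) 0) := by
  have hM1 : (1:Int) ≤ (M:Int) := by exact_mod_cast hM
  have hM0 : ¬ ((M:Int) = 0) := by omega
  have hMneg : ¬ ((M:Int) < 0) := by omega
  unfold PySem.List.slice? PySem.List.sliceIndices
  simp only [if_neg hM0, if_neg hMneg, if_neg (show ¬ ((M:Int) - 1 < 0) by omega),
    if_pos (show 0 < (M:Int) by omega), Option.getD_some]
  by_cases hlt : (M:Int) - 1 < (s.length : Int)
  · have hmin : min ((M:Int) - 1) (s.length : Int) = (M:Int) - 1 := min_eq_left (by omega)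
    rw [hmin, if_pos hlt]
    have hcnt : (((s.length : Int) - ((M:Int) - 1) + (M:Int) - 1) / (M:Int)).toNat
        = s.length / M := by
      have : ((s.length : Int) - ((M:Int) - 1) + (M:Int) - 1) = (s.length : Int) := by ring
      rw [this, ← Int.natCast_div, Int.toNat_natCast]
    rw [hcnt]
    rw [List.filterMap_congr (g := fun k => some (s.getD (M - 1 + M * k) 0)) ?_]
    · simp
    intro k hk
    have hk' : k < s.length / M := List.mem_range.mp hk
    have hidx : ((M:Int) - 1 + (M:Int) * (k:Int)).toNat = M - 1 + M * k := by omega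
    have hbnd : M - 1 + M * k < s.length := by
      have h2 : (k + 1) * M ≤ s.length := (Nat.le_div_iff_mul_le (by omega)).mp hk'
      have h2' : M * k + M ≤ s.length := by
        calc M * k + M = (k + 1) * M := by ring
          _ ≤ s.length := h2
      omega
    simp only [hidx, List.getElem?_eq_getElem hbnd, List.getD_eq_getElem s 0 hbnd]
  · have hmin : min ((M:Int) - 1) (s.length : Int) = (s.length : Int) := min_eq_right (by omega)
    rw [hmin, if_neg (lt_irrefl _)]
    have : s.length / M = 0 := Nat.div_eq_of_lt (by omega)
    simp [this]

theorem solution_spec : Claim_equal_solution := by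
  intro k m score _ hpre
  have hM : 1 ≤ m.toNat := by unfold Pre_solution at hpre; omega
  have hm : m = (m.toNat : Int) := by unfold Pre_solution at hpre; omega
  simp only [Spec_solution, solution, solution_alt]
  rw [hm, pvAside (PySem.List.sorted score (fun x => x) true) m.toNat hM
        (PySem.List.sorted_pairwise_rev score (fun x => x)),
    pvBside (PySem.List.sorted score (fun x => x) true) m.toNat hM]
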